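-- pv_equiv track=rewrite | github.com/rafaeltg/pydl | pydl/models/utils.py | expand_arg
-- ===== SOURCE A (Python) =====
-- def expand_arg(layers, arg_to_expand):
--
--     """Expands the arg_to_expand into the length of layers.
--     This is used as a convenience so that the user does not need to specify the
--     complete list of parameters for model initialization.
--     IE: the user can just specify one parameter and this function will expand it
--     :param layers:
--     :param arg_to_expand:
--     :return:
--     """
--
--     if not isinstance(arg_to_expand, list):
--         arg_to_expand = [arg_to_expand]
--
--     if len(arg_to_expand) == len(layers):
--         return arg_to_expand
--
--     if len(arg_to_expand) > len(layers):
--         return arg_to_expand[0:len(layers)]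
--
--     missing_values = len(layers) - len(arg_to_expand)
--     result = arg_to_expand + [arg_to_expand[-1] for _ in range(missing_values)]
--
--     return result
-- ===== SOURCE B (Python) =====
-- def expand_arg(layers, arg_to_expand):
--     if not isinstance(arg_to_expand, list):
--         arg_to_expand = [arg_to_expand]
--     m = len(arg_to_expand)
--     return [arg_to_expand[i if i < m else m - 1] for i in range(len(layers))]
-- ===== Notes on version B (the rewrite author's own statement) =====
-- stated objective: simpler
-- what changed: Replaces the three length-comparison branches, the slice and the pad-concatenation with a single comprehension that builds the output position-by-position using an index clamped to the last element.
import Mathlib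
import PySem

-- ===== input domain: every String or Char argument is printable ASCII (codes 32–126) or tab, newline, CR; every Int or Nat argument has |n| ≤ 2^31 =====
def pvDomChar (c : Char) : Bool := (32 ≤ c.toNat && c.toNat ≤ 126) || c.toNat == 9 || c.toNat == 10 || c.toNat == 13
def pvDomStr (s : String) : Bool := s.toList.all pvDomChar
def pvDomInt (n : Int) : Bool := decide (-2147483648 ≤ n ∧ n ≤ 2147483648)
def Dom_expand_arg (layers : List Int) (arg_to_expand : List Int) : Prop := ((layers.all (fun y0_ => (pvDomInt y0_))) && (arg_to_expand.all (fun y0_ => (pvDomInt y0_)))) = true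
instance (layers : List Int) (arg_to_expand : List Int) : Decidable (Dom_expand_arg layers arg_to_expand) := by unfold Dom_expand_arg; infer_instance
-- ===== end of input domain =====

-- B replaces A's three length-comparison branches, slice and pad-concatenation with a
-- single position-by-position comprehension using an index clamped to the last element (simpler).


-- ===== PORT A =====
-- (the isinstance branch never fires: arg_to_expand is a list in this typing)
def expand_arg (layers : List Int) (arg_to_expand : List Int) : List Int :=
  if arg_to_expand.length = layers.length then arg_to_expand
  else if arg_to_expand.length > layers.length then
    PySem.List.slice arg_to_expand (some 0) (some (layers.length : Int))
  else
    let missing_values := layers.length - arg_to_expand.length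
    arg_to_expand ++
      (List.range missing_values).map
        (fun _ => (PySem.List.pyGet? arg_to_expand (-1)).getD 0)

-- ===== PORT B =====
def expand_arg_alt (layers : List Int) (arg_to_expand : List Int) : List Int :=
  let m := arg_to_expand.length
  (List.range layers.length).map
    (fun i =>
      (PySem.List.pyGet? arg_to_expand
        (if i < m then (i : Int) else (m : Int) - 1)).getD 0)

-- ===== PRECONDITION & SPEC =====
-- Pre_ excludes exactly the inputs where Python A raises IndexError
-- (arg_to_expand[-1] on an empty list while layers is nonempty); B raises there too.
def Pre_expand_arg (layers : List Int) (arg_to_expand : List Int) : Prop :=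
  arg_to_expand ≠ [] ∨ layers = []
instance (layers : List Int) (arg_to_expand : List Int) : Decidable (Pre_expand_arg layers arg_to_expand) := by unfold Pre_expand_arg; infer_instance

def pvWitness_expand_arg : List Int × List Int := ([1, 2, 3], [7])

def Spec_expand_arg (layers : List Int) (arg_to_expand : List Int) (out : List Int) : Prop := out = expand_arg_alt layers arg_to_expand
instance (layers : List Int) (arg_to_expand : List Int) (out : List Int) : Decidable (Spec_expand_arg layers arg_to_expand out) := by unfold Spec_expand_arg; infer_instance

-- ===== CLAIM (what is proved, stated in full; the proofs are below) =====
def Claim_equal_expand_arg : Prop := ∀ (layers : List Int) (arg_to_expand : List Int), Dom_expand_arg layers arg_to_expand → Pre_expand_arg layers arg_to_expand → Spec_expand_arg layers arg_to_expand (expand_arg layers arg_to_expand)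

-- ===== LEMMAS AND PROOFS =====

-- B's clamped-index comprehension, described element-wise.
lemma alt_getElem (layers arg : List Int) (i : Nat) (hi : i < (expand_arg_alt layers arg).length)
    (hm : arg ≠ []) :
    (expand_arg_alt layers arg)[i] =
      if h : i < arg.length then arg[i] else arg.getLast hm := by
  have hlen : (expand_arg_alt layers arg).length = layers.length := by
    simp [expand_arg_alt]
  simp only [expand_arg_alt, List.getElem_map, List.getElem_range]
  split_ifs with h
  · rw [PySem.List.pyGet?_natCast]
    simp [List.getElem?_eq_getElem h]
  · have hm' : 0 < arg.length := List.length_pos_of_ne_nil hm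
    have : ((arg.length : Int) - 1) = ((arg.length - 1 : Nat) : Int) := by omega
    rw [this, PySem.List.pyGet?_natCast]
    have hlt : arg.length - 1 < arg.length := by omega
    rw [List.getElem?_eq_getElem hlt]
    simp [List.getLast_eq_getElem]

lemma alt_length (layers arg : List Int) :
    (expand_arg_alt layers arg).length = layers.length := by
  simp [expand_arg_alt]

-- ===== VERDICT (by name: the statement is the Claim_ definition above) =====
theorem expand_arg_spec : Claim_equal_expand_arg := by
  intro layers arg _ hpre
  unfold Spec_expand_arg
  by_cases hm : arg = []
  · rcases hpre with h | h
    · exact absurd hm h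
    · subst hm h; rfl
  · have hm' : 0 < arg.length := List.length_pos_of_ne_nil hm
    unfold expand_arg
    split_ifs with h1 h2
    · -- equal lengths
      apply List.ext_getElem (by rw [alt_length]; omega)
      intro i hi1 hi2
      rw [alt_getElem layers arg i hi2 hm, dif_pos hi1]
    · -- arg longer: slice = take
      rw [PySem.List.slice_zero_start, PySem.List.slice_to_natCast]
      apply List.ext_getElem
      · rw [alt_length, List.length_take]; omega
      · intro i hi1 hi2
        rw [alt_getElem layers arg i hi2 hm, List.getElem_take]
        rw [dif_pos (by simp at hi1; omega)]
    · -- arg shorter: pad with last element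
      simp only [PySem.List.pyGet?_neg_one, List.getLast?_eq_some_getLast hm, Option.getD_some]
      apply List.ext_getElem
      · rw [alt_length]; simp; omega
      · intro i hi1 hi2
        rw [alt_getElem layers arg i hi2 hm]
        by_cases hil : i < arg.length
        · rw [dif_pos hil, List.getElem_append_left hil]
        · rw [dif_neg hil]
          rw [List.getElem_append_right (by omega)]
          simp
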